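-- pv_equiv track=rewrite | github.com/Shelley-Katz/ECTAIME | core/ect_core_cli.py | dead_flat_segments
-- ===== SOURCE A (Python) =====
-- from typing import Any, Dict, Iterable, List, Optional, Sequence, Tuple
--
-- def dead_flat_segments(cc11_values: Sequence[int]) -> int:
--     if len(cc11_values) < 4:
--         return 0
--     count = 0
--     run = 1
--     for i in range(1, len(cc11_values)):
--         if cc11_values[i] == cc11_values[i - 1]:
--             run += 1
--         else:
--             if run >= 16:
--                 count += 1
--             run = 1
--     if run >= 16:
--         count += 1
--     return count
-- ===== SOURCE B (Python) =====
-- def dead_flat_segments(cc11_values) -> int: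
--     """Count maximal runs of equal consecutive values of length >= 16.
--
--     Two staged passes: first build the run-length encoding of the sequence
--     as an explicit list of (value, length) pairs, then count the entries
--     whose length is >= 16.  The len<4 guard of the original is redundant
--     (a short sequence has no run of 16) and is omitted.
--     """
--     runs = []
--     for x in cc11_values:
--         if runs and runs[-1][0] == x:
--             runs[-1] = (runs[-1][0], runs[-1][1] + 1)
--         else:
--             runs.append((x, 1))
--     return sum(1 for _, r in runs if r >= 16)
-- ===== Notes on version B (the rewrite author's own statement) =====
-- stated objective: alternative
-- what changed: Replaces the single-pass state machine (scalar run counter, immediate count increment, trailing flush, redundant len<4 guard) by two staged passes: build the full run-length encoding as a list of (value, length) pairs, then count entries with length >= 16.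
import Mathlib
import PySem

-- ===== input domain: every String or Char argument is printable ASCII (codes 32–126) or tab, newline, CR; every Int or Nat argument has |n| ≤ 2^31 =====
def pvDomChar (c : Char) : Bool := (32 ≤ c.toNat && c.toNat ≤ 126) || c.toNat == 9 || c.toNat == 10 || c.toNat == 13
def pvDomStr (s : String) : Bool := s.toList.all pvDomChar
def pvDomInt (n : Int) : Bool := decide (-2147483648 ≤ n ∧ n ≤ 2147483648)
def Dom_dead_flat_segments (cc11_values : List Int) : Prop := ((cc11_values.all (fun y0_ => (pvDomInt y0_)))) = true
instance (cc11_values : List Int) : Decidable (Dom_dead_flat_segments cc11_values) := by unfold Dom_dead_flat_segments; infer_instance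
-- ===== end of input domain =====

-- B replaces A's single-pass state machine (and its redundant len<4 guard) by two
-- staged passes: build the run-length encoding, then count entries ≥ 16 (objective: alternative).

-- ===== PORT A =====
-- A's for-loop compares each element with its predecessor, carrying (count, run);
-- ported as the obvious structural recursion carrying the previous element as state.
-- The trailing 'if run >= 16' flush appears in the [] base case.
def deadFlatLoopA (count run : Int) (prev : Int) : List Int → Int
  | [] => if run ≥ 16 then count + 1 else count
  | y :: ys =>
    if y = prev then deadFlatLoopA count (run + 1) y ys
    else deadFlatLoopA (if run ≥ 16 then count + 1 else count) 1 y ys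

def dead_flat_segments (cc11_values : List Int) : Int :=
  if cc11_values.length < 4 then 0
  else
    match cc11_values with
    | [] => 0  -- unreachable under the length guard
    | x :: rest => deadFlatLoopA 0 1 x rest

-- ===== PORT B =====
-- Source B pass 1: one loop step extending the last (value, length) run or appending a new one
def rleStep (runs : List (Int × Int)) (x : Int) : List (Int × Int) :=
  match runs.getLast? with
  | some (v, c) => if v = x then runs.dropLast ++ [(v, c + 1)] else runs ++ [(x, 1)]
  | none => [(x, 1)]

-- Source B pass 2: sum(1 for _, r in runs if r >= 16)
def countLong (runs : List (Int × Int)) : Int :=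
  (runs.countP (fun p => 16 ≤ p.2) : Nat)

def dead_flat_segments_alt (cc11_values : List Int) : Int :=
  countLong (cc11_values.foldl rleStep [])

-- ===== PRECONDITION & SPEC =====
def Spec_dead_flat_segments (cc11_values : List Int) (out : Int) : Prop := out = dead_flat_segments_alt cc11_values
instance (cc11_values : List Int) (out : Int) : Decidable (Spec_dead_flat_segments cc11_values out) := by unfold Spec_dead_flat_segments; infer_instance

-- ===== CLAIM (what is proved, stated in full; the proofs are below) =====
def Claim_equal_dead_flat_segments : Prop := ∀ (cc11_values : List Int), Dom_dead_flat_segments cc11_values → Spec_dead_flat_segments cc11_values (dead_flat_segments cc11_values)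

-- ===== LEMMAS AND PROOFS =====

theorem rleStep_append (A B : List (Int × Int)) (x : Int) (hB : B ≠ []) :
    rleStep (A ++ B) x = A ++ rleStep B x := by
  obtain ⟨L, p, rfl⟩ := (List.eq_nil_or_concat B).resolve_left hB
  obtain ⟨v, c⟩ := p
  unfold rleStep
  simp only [List.concat_eq_append, ← List.append_assoc, List.getLast?_concat,
    List.dropLast_concat]
  by_cases hv : v = x <;> simp [hv, List.append_assoc]

theorem rleStep_ne_nil (runs : List (Int × Int)) (x : Int) : rleStep runs x ≠ [] := by
  unfold rleStep
  cases h : runs.getLast? with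
  | none => simp
  | some p => obtain ⟨v, c⟩ := p; by_cases hv : v = x <;> simp [hv]

theorem foldl_rleStep_append (ys : List Int) : ∀ (A B : List (Int × Int)), B ≠ [] →
    List.foldl rleStep (A ++ B) ys = A ++ List.foldl rleStep B ys := by
  induction ys with
  | nil => intro A B _; simp
  | cons y ys ih =>
    intro A B hB
    simp only [List.foldl_cons]
    rw [rleStep_append A B y hB, ih A (rleStep B y) (rleStep_ne_nil B y)]

theorem countLong_append (A B : List (Int × Int)) :
    countLong (A ++ B) = countLong A + countLong B := by
  unfold countLong
  rw [List.countP_append]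
  push_cast
  ring

theorem countLong_single (v r : Int) :
    countLong [(v, r)] = if r ≥ 16 then 1 else 0 := by
  unfold countLong
  split_ifs with h1
  · simp [List.countP, List.countP.go, decide_eq_true h1]
  · simp [List.countP, List.countP.go, decide_eq_false h1]

-- A's loop with state (count, run, prev) equals count + the long-run count of
-- B's RLE fold seeded with the current run (prev, run).
theorem deadFlatLoopA_eq_rle (ys : List Int) : ∀ (c r prev : Int),
    deadFlatLoopA c r prev ys = c + countLong (List.foldl rleStep [(prev, r)] ys) := by
  induction ys with
  | nil =>
    intro c r prev
    simp only [deadFlatLoopA, List.foldl_nil, countLong_single]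
    split_ifs <;> omega
  | cons y ys ih =>
    intro c r prev
    by_cases h : y = prev
    · subst h
      simp only [deadFlatLoopA, if_true, List.foldl_cons]
      have hstep : rleStep [(y, r)] y = [(y, r + 1)] := by simp [rleStep]
      rw [hstep, ih c (r + 1) y]
    · have hstep : rleStep [(prev, r)] y = [(prev, r)] ++ [(y, 1)] := by
        simp [rleStep, Ne.symm h]
      simp only [deadFlatLoopA, if_neg h, List.foldl_cons]
      rw [hstep, foldl_rleStep_append ys [(prev, r)] [(y, 1)] (by simp),
        countLong_append, ih (if r ≥ 16 then c + 1 else c) 1 y, countLong_single]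
      split_ifs <;> ring

-- A's loop leaves count unchanged while the remaining input cannot complete a run of 16
theorem deadFlatLoopA_short (ys : List Int) : ∀ (c r prev : Int),
    1 ≤ r → r + (ys.length : Int) < 16 → deadFlatLoopA c r prev ys = c := by
  induction ys with
  | nil =>
    intro c r prev _ h
    simp only [List.length_nil] at h
    simp [deadFlatLoopA, if_neg (by omega : ¬ r ≥ 16)]
  | cons y ys ih =>
    intro c r prev hr h
    simp only [List.length_cons] at h
    by_cases hy : y = prev
    · simp only [deadFlatLoopA, if_pos hy]
      exact ih c (r + 1) y (by omega) (by push_cast at h; omega)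
    · simp only [deadFlatLoopA, if_neg hy]
      rw [if_neg (by push_cast at h; omega : ¬ r ≥ 16)]
      exact ih c 1 y le_rfl (by push_cast at h; omega)

-- ===== VERDICT (by name: the statement is the Claim_ definition above) =====
theorem dead_flat_segments_spec : Claim_equal_dead_flat_segments := by
  intro xs _
  unfold Spec_dead_flat_segments dead_flat_segments dead_flat_segments_alt
  match xs with
  | [] => simp [countLong]
  | x :: rest =>
    have hseed : List.foldl rleStep [] (x :: rest) = List.foldl rleStep [(x, 1)] rest := by
      simp [rleStep]
    have key : deadFlatLoopA 0 1 x rest = countLong (List.foldl rleStep [] (x :: rest)) := by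
      rw [hseed, deadFlatLoopA_eq_rle rest 0 1 x, zero_add]
    split_ifs with hlen
    · simp only [List.length_cons] at hlen
      rw [← key]
      exact (deadFlatLoopA_short rest 0 1 x le_rfl (by omega)).symm
    · exact key
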